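-- pv_equiv track=rewrite | github.com/drpython12/General-Coding-Exercises | double_letters.py | double_letters
-- ===== SOURCE A (Python) =====
-- def double_letters(word):
--     count = 0
--     for i in range(0, len(word) - 1):
--             if word[i] == word[i+1]:
--                 count += 1
--     if count == 1:
--         return(True)
--     else:
--         return(False)
-- ===== SOURCE B (Python) =====
-- def double_letters(word):
--     # Run-based: each maximal run of length L contributes L-1 adjacent equal pairs.
--     total = 0
--     i = 0
--     n = len(word)
--     while i < n:
--         j = i + 1
--         while j < n and word[j] == word[i]:
--             j += 1
--         total += j - i - 1
--         i = j
--     return total == 1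
-- ===== Notes on version B (the rewrite author's own statement) =====
-- stated objective: alternative
-- what changed: A counts overlapping adjacent equal pairs with one indexed scan over range(len-1); B instead walks the string as maximal runs of identical characters and sums (run length - 1) per run, testing the total against 1.
import Mathlib
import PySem

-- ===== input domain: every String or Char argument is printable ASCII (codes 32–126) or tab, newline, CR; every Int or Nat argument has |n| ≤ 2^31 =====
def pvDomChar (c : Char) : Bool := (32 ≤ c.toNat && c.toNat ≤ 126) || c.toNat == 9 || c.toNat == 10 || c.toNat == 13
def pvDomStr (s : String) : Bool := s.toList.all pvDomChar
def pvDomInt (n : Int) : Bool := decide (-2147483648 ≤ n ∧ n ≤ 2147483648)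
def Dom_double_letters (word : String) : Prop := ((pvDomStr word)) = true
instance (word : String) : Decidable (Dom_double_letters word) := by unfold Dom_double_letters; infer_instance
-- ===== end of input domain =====

-- B walks the string as maximal runs of identical characters and sums (run length - 1);
-- A counts adjacent equal index pairs directly. Same O(n) cost, different decomposition.

-- ===== PORT A =====
-- count = 0; for i in range(0, len(word)-1): if word[i]==word[i+1]: count += 1; return count == 1
def double_letters (word : String) : Bool :=
  let count : Int :=
    (PySem.List.pyRange 0 (PySem.Str.len word - 1) 1).foldl
      (fun c i =>
        if PySem.Str.pyGet? word i = PySem.Str.pyGet? word (i + 1) then c + 1 else c) 0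
  count == 1

-- ===== PORT B =====
-- outer while: one step per maximal run; inner while (the scan j = i+1 .. run end) is the
-- takeWhile over the tail, its length is j - i - 1; advancing i to j is the dropWhile.
def pvRunPairs : List Char → Int
  | [] => 0
  | c :: rest =>
      ((rest.takeWhile (· == c)).length : Int) + pvRunPairs (rest.dropWhile (· == c))
  termination_by l => l.length
  decreasing_by
    simpa using Nat.lt_succ_of_le (List.length_dropWhile_le (· == c) rest)

def double_letters_alt (word : String) : Bool :=
  pvRunPairs word.toList == 1

-- ===== PRECONDITION & SPEC =====
def Spec_double_letters (word : String) (out : Bool) : Prop := out = double_letters_alt word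
instance (word : String) (out : Bool) : Decidable (Spec_double_letters word out) := by unfold Spec_double_letters; infer_instance

-- ===== CLAIM (what is proved, stated in full; the proofs are below) =====
def Claim_equal_double_letters : Prop := ∀ (word : String), Dom_double_letters word → Spec_double_letters word (double_letters word)

-- ===== LEMMAS AND PROOFS =====

-- reference count: number of overlapping adjacent equal pairs
def pvAdjCount : List Char → Int
  | a :: b :: t => (if a = b then 1 else 0) + pvAdjCount (b :: t)
  | _ => 0

theorem pvRunPairs_eq_adjCount : ∀ l : List Char, pvRunPairs l = pvAdjCount l := by
  intro l
  induction l with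
  | nil => simp [pvRunPairs, pvAdjCount]
  | cons c rest ih =>
    cases rest with
    | nil => simp [pvRunPairs, pvAdjCount]
    | cons b t =>
      by_cases hbc : b = c
      · subst hbc
        rw [pvRunPairs] at ih ⊢
        simp only [List.takeWhile_cons, List.dropWhile_cons, beq_self_eq_true, if_true,
          List.length_cons] at ih ⊢
        rw [pvAdjCount, if_pos rfl]
        push_cast
        omega
      · have hbeq : (b == c) = false := by simp [hbc]
        have hcb : ¬ c = b := fun h => hbc h.symm
        rw [pvRunPairs]
        simp only [List.takeWhile_cons, List.dropWhile_cons, hbeq, if_false,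
          List.length_nil, Bool.false_eq_true]
        rw [pvAdjCount, ih]
        simp [hcb]

theorem pvFold_eq_adjCount : ∀ (l : List Char) (c : Int),
    (List.range (l.length - 1)).foldl
      (fun c k => if l[k]? = l[k + 1]? then c + 1 else c) c
    = c + pvAdjCount l := by
  intro l
  induction l with
  | nil => intro c; simp [pvAdjCount]
  | cons a rest ih =>
    intro c
    cases rest with
    | nil => simp [pvAdjCount]
    | cons b t =>
      have hlen : (a :: b :: t).length - 1 = t.length + 1 := by simp
      rw [hlen, List.range_succ_eq_map, List.foldl_cons, List.foldl_map]
      simp only [List.getElem?_cons_succ, List.getElem?_cons_zero]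
      have ht : (b :: t).length - 1 = t.length := by simp
      have h2 := ih (c := if (some a : Option Char) = some b then c + 1 else c)
      rw [ht] at h2
      simp only [List.getElem?_cons_succ] at h2 ⊢
      refine h2.trans ?_
      rw [pvAdjCount]
      by_cases hab : a = b <;> simp [hab] ; omega

-- ===== VERDICT (by name: the statement is the Claim_ definition above) =====
theorem double_letters_spec : Claim_equal_double_letters := by
  intro word _
  unfold Spec_double_letters double_letters double_letters_alt
  rw [pvRunPairs_eq_adjCount]
  rw [PySem.List.pyRange_one]
  simp only [zero_add, List.foldl_map, PySem.Str.len_eq]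
  have hto : ((word.toList.length : Int) - 1 - 0).toNat = word.toList.length - 1 := by omega
  rw [hto]
  have h := pvFold_eq_adjCount word.toList 0
  rw [zero_add] at h
  rw [show (fun (x : Int) (y : Nat) =>
        if PySem.Str.pyGet? word (y : Int) = PySem.Str.pyGet? word ((y : Int) + 1) then x + 1 else x)
      = (fun (x : Int) (y : Nat) =>
        if word.toList[y]? = word.toList[y + 1]? then x + 1 else x) from by
      funext x y
      have hc : ((y : Int) + 1) = ((y + 1 : Nat) : Int) := by push_cast; ring
      rw [hc, PySem.Str.pyGet?_natCast, PySem.Str.pyGet?_natCast]]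
  rw [h]
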